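-- pv_equiv track=rewrite | github.com/chenjiahui1991/LeetCode | P0201.py | rangeBitwiseAnd
-- ===== SOURCE A (Python) =====
-- def rangeBitwiseAnd(m, n):
--     """
--     :type m: int
--     :type n: int
--     :rtype: int
--     """
--     template = (2 ** 31 - 1) ^ m
--     tmp = m
--     now = 1
--     result = 0
--     while tmp > 0:
--         last = tmp & 1
--         if last == 1 and m + (template & (2 ** now - 1)) + 1 > n:
--             result = result + 2 ** (now - 1)
--         now += 1
--         tmp = tmp >> 1
--     return result
-- ===== SOURCE B (Python) =====
-- def rangeBitwiseAnd(m, n):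
--     shift = 0
--     while m < n:
--         m >>= 1
--         n >>= 1
--         shift += 1
--     return m << shift
-- ===== Notes on version B (the rewrite author's own statement) =====
-- stated objective: simpler
-- what changed: Replaces A's per-bit scan of m (testing each set bit against a 31-bit complement template and a mask) by the classic common-prefix loop that right-shifts m and n together until they meet and shifts the prefix back; Pre_ excludes m < 0, where A's immediate 0 is a degenerate artefact of its loop guard and B's shift loop does not terminate.
-- outside the precondition, e.g. on rangeBitwiseAnd(-5, 3): A returns 0, B does not finish within the time limit
import Mathlib
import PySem

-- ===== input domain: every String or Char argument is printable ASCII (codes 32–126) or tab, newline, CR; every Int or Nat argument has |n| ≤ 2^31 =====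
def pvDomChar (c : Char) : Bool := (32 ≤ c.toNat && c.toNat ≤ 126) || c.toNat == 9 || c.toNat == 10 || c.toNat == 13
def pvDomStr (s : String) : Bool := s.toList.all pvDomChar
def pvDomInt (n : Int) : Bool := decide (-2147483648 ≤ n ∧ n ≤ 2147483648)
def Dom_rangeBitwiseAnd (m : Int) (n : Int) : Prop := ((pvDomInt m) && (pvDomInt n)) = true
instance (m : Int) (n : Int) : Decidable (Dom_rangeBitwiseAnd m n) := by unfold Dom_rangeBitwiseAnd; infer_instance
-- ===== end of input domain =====

-- B replaces A's per-bit template/mask scan of m by the classic common-prefix shift loop (objective: simpler).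


-- ===== PORT A =====
-- the while-loop of A: state (tmp, now, result); m, n, template are fixed
def aLoop (m n template : Int) (tmp : Int) (now : Nat) (result : Int) : Int :=
  if h : tmp > 0 then
    let last := PySem.Int.band tmp 1
    let result' := if last = 1 ∧ m + PySem.Int.band template (2 ^ now - 1) + 1 > n
      then result + 2 ^ (now - 1) else result
    aLoop m n template (PySem.Int.floordiv tmp 2) (now + 1) result'
  else result
termination_by tmp.toNat
decreasing_by
  rw [PySem.Int.floordiv_eq_ediv_of_pos (by norm_num : (0:Int) < 2)]
  omega

def rangeBitwiseAnd (m : Int) (n : Int) : Int :=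
  let template := PySem.Int.bxor (2 ^ 31 - 1) m
  aLoop m n template m 1 0

-- ===== PORT B =====
-- the while-loop of B; the '0 ≤ m' conjunct is ONLY a totality guard (under Pre_ it is
-- invariant, so the loop is exactly Source B's 'while m < n'; for m < 0 Source B does not terminate)
def bLoop (m n : Int) (shift : Nat) : Int :=
  if h : 0 ≤ m ∧ m < n then
    bLoop (PySem.Int.floordiv m 2) (PySem.Int.floordiv n 2) (shift + 1)
  else m * 2 ^ shift
termination_by n.toNat
decreasing_by
  rw [PySem.Int.floordiv_eq_ediv_of_pos (by norm_num : (0:Int) < 2)]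
  omega

def rangeBitwiseAnd_alt (m : Int) (n : Int) : Int := bLoop m n 0

-- ===== PRECONDITION & SPEC =====
-- Pre_ excludes m < 0: A's immediate 0 there is a degenerate artefact of its 'tmp > 0' loop
-- guard outside the problem's natural domain (0 ≤ m ≤ n), and B's shift loop does not terminate.
def Pre_rangeBitwiseAnd (m : Int) (_n : Int) : Prop := 0 ≤ m
instance (m : Int) (n : Int) : Decidable (Pre_rangeBitwiseAnd m n) := by unfold Pre_rangeBitwiseAnd; infer_instance

def pvWitness_rangeBitwiseAnd : Int × Int := (5, 7)

def Spec_rangeBitwiseAnd (m : Int) (n : Int) (out : Int) : Prop := out = rangeBitwiseAnd_alt m n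
instance (m : Int) (n : Int) (out : Int) : Decidable (Spec_rangeBitwiseAnd m n out) := by unfold Spec_rangeBitwiseAnd; infer_instance

-- ===== CLAIM (what is proved, stated in full; the proofs are below) =====
def Claim_equal_rangeBitwiseAnd : Prop := ∀ (m : Int) (n : Int), Dom_rangeBitwiseAnd m n → Pre_rangeBitwiseAnd m n → Spec_rangeBitwiseAnd m n (rangeBitwiseAnd m n)

-- ===== LEMMAS AND PROOFS =====

-- Python '>> 1' (= floordiv by 2) is Int.ediv by 2
theorem fdiv_two_eq (x : Int) : PySem.Int.floordiv x 2 = x / 2 :=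
  PySem.Int.floordiv_eq_ediv_of_pos (by norm_num)

-- x / 2 / 2^k = x / 2^(k+1) and x / 2^k / 2 = x / 2^(k+1)
theorem ediv_two_pow (x : Int) (k : Nat) : x / 2 / 2 ^ k = x / 2 ^ (k + 1) := by
  rw [Int.ediv_ediv_of_nonneg (by norm_num : (0:Int) ≤ 2), pow_succ, mul_comm]

theorem ediv_pow_two (x : Int) (k : Nat) : x / 2 ^ k / 2 = x / 2 ^ (k + 1) := by
  rw [Int.ediv_ediv_of_nonneg (by positivity : (0:Int) ≤ 2 ^ k), pow_succ]

-- xor against a full low mask is complement within the mask (Nat side)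
theorem mask_xor_nat (k : Nat) : ∀ x : Nat, x < 2 ^ k → (2 ^ k - 1) ^^^ x = 2 ^ k - 1 - x := by
  induction k with
  | zero => intro x h; interval_cases x; rfl
  | succ k ih =>
    intro x h
    have hx2 : x / 2 < 2 ^ k := by rw [pow_succ] at h; omega
    have h1 : (2 ^ (k + 1) - 1) / 2 = 2 ^ k - 1 := by rw [pow_succ]; omega
    have hhalf : ((2 ^ (k + 1) - 1) ^^^ x) / 2 = 2 ^ k - 1 - x / 2 := by
      rw [Nat.xor_div_two, h1, ih _ hx2]
    have hmod : ((2 ^ (k + 1) - 1) ^^^ x) % 2 = (2 ^ (k + 1) - 1 + x) % 2 := Nat.xor_mod_two_eq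
    have hp : 1 ≤ 2 ^ k := Nat.one_le_two_pow
    rw [pow_succ] at *
    omega

-- (2^31 - 1) % 2^k = 2^k - 1 for k ≤ 31 (Nat)
theorem mask31_mod (k : Nat) (hk : k ≤ 31) : (2 ^ 31 - 1) % 2 ^ k = 2 ^ k - 1 := by
  have hsplit : (2:Nat) ^ 31 = 2 ^ k * 2 ^ (31 - k) := by
    rw [← pow_add]; congr 1; omega
  have hq : 1 ≤ (2:Nat) ^ (31 - k) := Nat.one_le_two_pow
  have hp : 1 ≤ (2:Nat) ^ k := Nat.one_le_two_pow
  have hk31 : (2:Nat) ^ k ≤ 2 ^ 31 := Nat.pow_le_pow_right (by norm_num) hk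
  have hd : 2 ^ 31 - 1 = 2 ^ k * (2 ^ (31 - k) - 1) + (2 ^ k - 1) := by
    rw [Nat.mul_sub_one, ← hsplit]; omega
  rw [hd, Nat.mul_add_mod, Nat.mod_eq_of_lt (by omega)]

-- the value of A's 'template & (2**now - 1)' for 0 ≤ m < 2^31, k ≤ 31
theorem template_band (m : Int) (hm0 : 0 ≤ m) (hm : m < 2 ^ 31) (k : Nat) (hk : k ≤ 31) :
    PySem.Int.band (PySem.Int.bxor (2 ^ 31 - 1) m) (2 ^ k - 1)
      = 2 ^ k - 1 - m % 2 ^ k := by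
  have hcast : ((2 ^ k : Nat) : Int) = 2 ^ k := by push_cast; ring
  have hmk : (0:Int) ≤ 2 ^ k - 1 := by
    have : (1:Nat) ≤ 2 ^ k := Nat.one_le_two_pow
    omega
  rw [PySem.Int.bxor_of_nonneg (by norm_num) hm0]
  rw [PySem.Int.band_of_nonneg (Int.natCast_nonneg _) hmk]
  have htn : ((2:Int) ^ 31 - 1).toNat = 2 ^ 31 - 1 := by decide
  have htk : ((2:Int) ^ k - 1).toNat = 2 ^ k - 1 := by omega
  rw [Int.toNat_natCast, htn, htk, Nat.and_xor_distrib_right,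
      Nat.and_two_pow_sub_one_eq_mod, Nat.and_two_pow_sub_one_eq_mod, mask31_mod k hk]
  have hplt : (0:Nat) < 2 ^ k := Nat.one_le_two_pow
  have hlt : m.toNat % 2 ^ k < 2 ^ k := Nat.mod_lt _ hplt
  rw [mask_xor_nat k _ hlt]
  have hmodeq : m % ((2:Int) ^ k) = ((m.toNat % 2 ^ k : Nat) : Int) := by
    conv_lhs => rw [show m = ((m.toNat : Nat) : Int) by omega, ← hcast]
    push_cast
    ring
  rw [hmodeq]
  omega

-- A's loop condition at counter k is exactly 'n / 2^k ≤ m / 2^k'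
theorem cond_iff (m n : Int) (hm0 : 0 ≤ m) (hm : m < 2 ^ 31) (k : Nat) (hk : k ≤ 31) :
    (m + PySem.Int.band (PySem.Int.bxor (2 ^ 31 - 1) m) (2 ^ k - 1) + 1 > n)
      ↔ (n / 2 ^ k ≤ m / 2 ^ k) := by
  have hpos : (0:Int) < 2 ^ k := by positivity
  rw [template_band m hm0 hm k hk]
  have hdm : 2 ^ k * (m / 2 ^ k) + m % 2 ^ k = m := Int.mul_ediv_add_emod m (2 ^ k)
  have hexp : (m / 2 ^ k + 1) * 2 ^ k = 2 ^ k * (m / 2 ^ k) + 2 ^ k := by ring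
  have key : m + (2 ^ k - 1 - m % 2 ^ k) + 1 = (m / 2 ^ k + 1) * 2 ^ k := by omega
  rw [gt_iff_lt, key, ← Int.ediv_lt_iff_lt_mul hpos]
  omega

-- when n ≤ m every condition in A's loop holds, so the loop just re-assembles tmp's bits
theorem aLoop_all (m n template : Int) (hnm : n ≤ m) :
    ∀ t : Nat, ∀ tmp : Int, tmp.toNat = t → 0 ≤ tmp → ∀ now : Nat, 1 ≤ now → ∀ r : Int,
      aLoop m n template tmp now r = r + tmp * 2 ^ (now - 1) := by
  intro t
  induction t using Nat.strong_induction_on with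
  | _ t ih =>
    intro tmp ht htp now hnow r
    rw [aLoop]
    by_cases hpos : tmp > 0
    · simp only [hpos, dite_true]
      have hb1 : PySem.Int.band tmp 1 = PySem.Int.mod tmp 2 := PySem.Int.band_one tmp
      have hmod := PySem.Int.mod_eq_emod_of_pos (a := tmp) (b := 2) (by norm_num)
      have hbnn : (0:Int) ≤ PySem.Int.band template (2 ^ now - 1) := by
        rw [PySem.Int.band_comm]
        refine PySem.Int.band_nonneg_of_nonneg_left template ?_
        have : (1:Int) ≤ 2 ^ now := one_le_pow₀ (by norm_num)
        omega
      have hgt : m + PySem.Int.band template (2 ^ now - 1) + 1 > n := by omega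
      have hfd := fdiv_two_eq tmp
      have hrec := ih (PySem.Int.floordiv tmp 2).toNat (by rw [hfd]; omega)
        (PySem.Int.floordiv tmp 2) rfl (by rw [hfd]; omega) (now + 1) (by omega)
      have h2 : (2:Int) ^ (now + 1 - 1) = 2 * 2 ^ (now - 1) := by
        rw [show now + 1 - 1 = (now - 1) + 1 by omega, pow_succ]; ring
      by_cases hlast : PySem.Int.band tmp 1 = 1
      · rw [if_pos ⟨hlast, hgt⟩, hrec _, h2, hfd]
        have hone : tmp % 2 = 1 := by rw [hb1, hmod] at hlast; omega
        have hq : tmp * (2:Int) ^ (now - 1) = (2 * (tmp / 2) + 1) * 2 ^ (now - 1) := by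
          rw [← show tmp = 2 * (tmp / 2) + 1 by omega]
        rw [hq]; ring
      · rw [if_neg (by tauto), hrec _, h2, hfd]
        have hzero : tmp % 2 = 0 := by rw [hb1, hmod] at hlast; omega
        have hq : tmp * (2:Int) ^ (now - 1) = (2 * (tmp / 2)) * 2 ^ (now - 1) := by
          rw [← show tmp = 2 * (tmp / 2) by omega]
        rw [hq]; ring
    · simp only [hpos, dite_false]
      have : tmp = 0 := by omega
      subst this; ring

-- the tail of A's loop for (m, n) from counter now+1 is twice the tail for (m/2, n/2) from now
theorem aLoop_shift (m n : Int) (hm0 : 0 ≤ m) (hm : m < 2 ^ 31) :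
    ∀ t : Nat, ∀ tmp : Int, tmp.toNat = t → ∀ now : Nat, 1 ≤ now → tmp = m / 2 ^ now →
    ∀ r : Int,
      aLoop m n (PySem.Int.bxor (2 ^ 31 - 1) m) tmp (now + 1) (2 * r)
        = 2 * aLoop (m / 2) (n / 2) (PySem.Int.bxor (2 ^ 31 - 1) (m / 2)) tmp now r := by
  intro t
  induction t using Nat.strong_induction_on with
  | _ t ih =>
    intro tmp ht now hnow htmp r
    conv_lhs => rw [aLoop]
    conv_rhs => rw [aLoop]
    by_cases hpos : tmp > 0
    · simp only [hpos, dite_true]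
      -- now ≤ 30
      have h2le : (2:Int) ^ now ≤ m := by
        have h1 : (1:Int) ≤ m / 2 ^ now := by omega
        have := (Int.le_ediv_iff_mul_le (by positivity : (0:Int) < 2 ^ now)).mp h1
        omega
      have hnow30 : now ≤ 30 := by
        have : (2:Int) ^ now < 2 ^ 31 := lt_of_le_of_lt h2le hm
        have := pow_lt_pow_iff_right₀ (by norm_num : (1:Int) < 2) |>.mp this
        omega
      have hm20 : 0 ≤ m / 2 := Int.ediv_nonneg hm0 (by norm_num)
      have hm2 : m / 2 < 2 ^ 31 := lt_of_le_of_lt (Int.ediv_le_self 2 hm0) hm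
      -- the two conditions are equivalent
      have hcond : (m + PySem.Int.band (PySem.Int.bxor (2 ^ 31 - 1) m) (2 ^ (now + 1) - 1) + 1 > n)
          ↔ (m / 2 + PySem.Int.band (PySem.Int.bxor (2 ^ 31 - 1) (m / 2)) (2 ^ now - 1) + 1 > n / 2) := by
        rw [cond_iff m n hm0 hm (now + 1) (by omega),
            cond_iff (m / 2) (n / 2) hm20 hm2 now (by omega),
            ediv_two_pow n now, ediv_two_pow m now]
      have h2p : (2:Int) ^ (now + 1 - 1) = 2 * 2 ^ (now - 1) := by
        rw [show now + 1 - 1 = (now - 1) + 1 by omega, pow_succ]; ring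
      have hfd := fdiv_two_eq tmp
      have hnext : PySem.Int.floordiv tmp 2 = m / 2 ^ (now + 1) := by
        rw [hfd, htmp, ediv_pow_two]
      have hrec := fun r' => ih (PySem.Int.floordiv tmp 2).toNat
        (by rw [hfd]; omega) (PySem.Int.floordiv tmp 2) rfl (now + 1) (by omega) hnext r'
      by_cases hc : PySem.Int.band tmp 1 = 1 ∧
          m / 2 + PySem.Int.band (PySem.Int.bxor (2 ^ 31 - 1) (m / 2)) (2 ^ now - 1) + 1 > n / 2
      · rw [if_pos ⟨hc.1, hcond.mpr hc.2⟩, if_pos hc,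
            show 2 * r + 2 ^ (now + 1 - 1) = 2 * (r + 2 ^ (now - 1)) from by rw [h2p]; ring]
        exact hrec _
      · rw [if_neg (fun h => hc ⟨h.1, hcond.mp h.2⟩), if_neg hc]
        exact hrec _
    · simp only [hpos, dite_false]

-- n ≤ m: A returns m
theorem aOne (m n : Int) (hm0 : 0 ≤ m) (hnm : n ≤ m) : rangeBitwiseAnd m n = m := by
  show aLoop m n _ m 1 0 = m
  rw [aLoop_all m n _ hnm m.toNat m rfl hm0 1 (by omega) 0]
  simp

-- 0 ≤ m < n: A satisfies the halving recurrence
theorem aTwo (m n : Int) (hm0 : 0 ≤ m) (hmn : m < n) (hn : n ≤ 2 ^ 31) :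
    rangeBitwiseAnd m n = 2 * rangeBitwiseAnd (m / 2) (n / 2) := by
  have hm31 : m < 2 ^ 31 := by omega
  show aLoop m n _ m 1 0 = 2 * aLoop (m / 2) (n / 2) _ (m / 2) 1 0
  by_cases hm : m = 0
  · subst hm
    norm_num
    conv_lhs => rw [aLoop]
    conv_rhs => rw [aLoop]
    norm_num
  · rw [aLoop]
    have hpos : m > 0 := by omega
    simp only [hpos, dite_true]
    -- the bit-0 contribution is zero: band m 1 = 1 together with cond(1) contradicts m < n
    have hnc : ¬ (PySem.Int.band m 1 = 1 ∧
        m + PySem.Int.band (PySem.Int.bxor (2 ^ 31 - 1) m) (2 ^ 1 - 1) + 1 > n) := by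
      rintro ⟨h1, h2⟩
      rw [cond_iff m n hm0 hm31 1 (by omega)] at h2
      rw [PySem.Int.band_one, PySem.Int.mod_eq_emod_of_pos (by norm_num)] at h1
      have hle : m / 2 ≤ n / 2 := Int.ediv_le_ediv (by norm_num) (le_of_lt hmn)
      rw [pow_one] at h2
      omega
    rw [if_neg hnc]
    have := aLoop_shift m n hm0 hm31 (PySem.Int.floordiv m 2).toNat
      (PySem.Int.floordiv m 2) rfl 1 (by omega)
      (by rw [fdiv_two_eq, pow_one]) 0
    rw [mul_zero] at this
    rw [this, fdiv_two_eq]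

-- the B loop computes A's value times 2^shift
theorem bLoop_eq : ∀ N : Nat, ∀ m n : Int, ∀ sh : Nat, n.toNat ≤ N → 0 ≤ m → m ≤ 2 ^ 31 →
    n ≤ 2 ^ 31 → bLoop m n sh = rangeBitwiseAnd m n * 2 ^ sh := by
  intro N
  induction N with
  | zero =>
    intro m n sh hN hm0 hm hn
    rw [bLoop]
    have hnm : ¬ m < n := by omega
    rw [dif_neg (fun h => hnm h.2), aOne m n hm0 (by omega)]
  | succ N ihN =>
    intro m n sh hN hm0 hm hn
    rw [bLoop]
    by_cases hmn : m < n
    · rw [dif_pos ⟨hm0, hmn⟩, fdiv_two_eq, fdiv_two_eq]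
      have hn1 : 1 ≤ n := by omega
      have ih := ihN (m / 2) (n / 2) (sh + 1) (by omega)
        (Int.ediv_nonneg hm0 (by norm_num)) (by omega) (by omega)
      rw [ih, aTwo m n hm0 hmn hn, pow_succ]
      ring
    · rw [dif_neg (fun h => hmn h.2), aOne m n hm0 (by omega)]

-- ===== VERDICT (by name: the statement is the Claim_ definition above) =====
theorem rangeBitwiseAnd_spec : Claim_equal_rangeBitwiseAnd := by
  intro m n hdom hpre
  have hb : (-2147483648 ≤ m ∧ m ≤ 2147483648) ∧ (-2147483648 ≤ n ∧ n ≤ 2147483648) := by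
    simp only [Dom_rangeBitwiseAnd, pvDomInt, Bool.and_eq_true, decide_eq_true_eq] at hdom
    exact hdom
  show rangeBitwiseAnd m n = rangeBitwiseAnd_alt m n
  have := bLoop_eq n.toNat m n 0 (le_refl _) hpre (by omega) (by omega)
  unfold rangeBitwiseAnd_alt
  rw [this, pow_zero, mul_one]
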